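-- pv_equiv track=rewrite | github.com/saideepshetty/general-programs | giveCandies.py | giveCandies
-- ===== SOURCE A (Python) =====
-- def giveCandies(children):
--     children.sort()
--     candies = 0
--
--     d = {}
--
--     for i in range(len(children)):
--         if children[i] not in d:
--             d[children[i]] = 1
--         else:
--             d[children[i]] += 1
--
--     count = 1
--     for i in sorted(d.keys()):
--         candies += count * d[i]
--         count += 1
--
--     return candies
-- ===== SOURCE B (Python) =====
-- def giveCandies(children):
--     children.sort()
--     total = 0
--     rank = 0
--     prev = None
--     for x in children:
--         if prev is None or x != prev:
--             rank += 1
--         total += rank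
--         prev = x
--     return total
-- ===== Notes on version B (the rewrite author's own statement) =====
-- stated objective: faster
-- what changed: Replaces the frequency-dict build plus a second sort of the distinct keys by a single linear pass over the already-sorted list that maintains a running rank and previous value.
import Mathlib
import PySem

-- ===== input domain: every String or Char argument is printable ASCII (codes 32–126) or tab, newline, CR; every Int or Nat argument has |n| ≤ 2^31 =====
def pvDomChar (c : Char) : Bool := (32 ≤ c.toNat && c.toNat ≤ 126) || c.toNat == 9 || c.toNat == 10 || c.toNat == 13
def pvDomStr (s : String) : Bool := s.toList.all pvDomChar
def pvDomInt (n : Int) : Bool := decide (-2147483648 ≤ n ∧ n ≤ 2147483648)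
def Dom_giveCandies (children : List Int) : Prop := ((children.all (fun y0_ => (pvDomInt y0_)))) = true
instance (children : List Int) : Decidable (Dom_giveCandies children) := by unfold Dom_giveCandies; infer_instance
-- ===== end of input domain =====

-- B replaces A's frequency-dict build plus second key-sort by one linear rank-scan over the
-- sorted list (objective: faster by a constant factor on the non-sort part; both A and B sort
-- the argument list in place, so the observable mutation is identical; the equivalence proved
-- here is about the return value).


-- ===== PORT A =====
def giveCandies (children : List Int) : Int :=
  let s := PySem.List.sorted children (fun x => x)      -- children.sort()
  let candies : Int := 0
  let d : PySem.Dict Int Int :=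
    (PySem.List.pyRange 0 (PySem.List.len s)).foldl
      (fun d i =>
        -- children[i]: i ranges over range(len(children)), so the index is in range and pyGetD is exact
        let x := PySem.List.pyGetD s i 0
        if d.contains x = false then d.insert x 1 else d.modify x 0 (· + 1))
      PySem.Dict.empty
  let r := (PySem.List.sorted d.keys (fun x => x)).foldl
      -- d[i]: the key comes from d.keys, so it is present and getD is exact
      (fun (p : Int × Int) k => (p.1 + p.2 * d.getD k 0, p.2 + 1)) (candies, 1)
  r.1

-- ===== PORT B =====
def giveCandies_alt (children : List Int) : Int :=
  let s := PySem.List.sorted children (fun x => x)      -- children.sort()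
  let r := s.foldl
      (fun (st : Int × Int × Option Int) x =>
        let rank := match st.2.2 with
          | none => st.2.1 + 1
          | some p => if x ≠ p then st.2.1 + 1 else st.2.1
        (st.1 + rank, rank, some x))
      (0, 0, none)
  r.1

-- ===== PRECONDITION & SPEC =====
def Spec_giveCandies (children : List Int) (out : Int) : Prop := out = giveCandies_alt children
instance (children : List Int) (out : Int) : Decidable (Spec_giveCandies children out) := by unfold Spec_giveCandies; infer_instance

-- ===== CLAIM (what is proved, stated in full; the proofs are below) =====
def Claim_equal_giveCandies : Prop := ∀ (children : List Int), Dom_giveCandies children → Spec_giveCandies children (giveCandies children)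

-- ===== LEMMAS AND PROOFS =====

-- A's index loop over range(len(s)) builds Counter(s)
theorem pvDictEqCounter (s : List Int) :
    (s.foldl (fun d x => if d.contains x = false then d.insert x 1 else d.modify x 0 (· + 1))
      PySem.Dict.empty) = PySem.Dict.counter s := by
  rw [PySem.Dict.counter_eq_foldl]
  apply PySem.List.foldl_congr_mem
  intro d x _
  by_cases hc : d.contains x = false
  · simp [hc, PySem.Dict.modify, PySem.Dict.getD_of_not_contains d 0 hc]
  · simp [hc]

-- A with the dict loop collapsed to Counter
theorem pvStep1 (children : List Int) :
    giveCandies children =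
      (let s := PySem.List.sorted children (fun x => x)
       let d := PySem.Dict.counter s
       ((PySem.List.sorted d.keys (fun x => x)).foldl
        (fun (p : Int × Int) k => (p.1 + p.2 * d.getD k 0, p.2 + 1)) (0, 1)).1) := by
  unfold giveCandies
  dsimp only
  generalize PySem.List.sorted children (fun x => x) = s
  rw [PySem.List.foldl_pyRange_pyGetD (xs := s) (d := 0)
    (f := fun (d : PySem.Dict Int Int) (x : Int) => if d.contains x = false then d.insert x 1 else d.modify x 0 (· + 1))
    (init := (PySem.Dict.empty : PySem.Dict Int Int)) (le_refl 0)]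
  rw [Int.toNat_zero, List.drop_zero]
  rw [pvDictEqCounter]

-- A's ranked-sum loop, closed form over a strictly increasing key list
theorem pvFoldA (cnt : Int → Int) (ks : List Int) (hks : ks.Pairwise (· < ·)) :
    ∀ (c n : Int),
      (ks.foldl (fun p k => (p.1 + p.2 * cnt k, p.2 + 1)) (c, n)).1
        = c + (ks.map (fun k => (n + (ks.countP (fun v => decide (v < k)) : Int)) * cnt k)).sum := by
  induction ks with
  | nil => simp
  | cons k0 ks ih =>
    intro c n
    have hhead := (List.pairwise_cons.mp hks).1
    have htail := (List.pairwise_cons.mp hks).2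
    simp only [List.foldl_cons]
    rw [ih htail (c + n * cnt k0) (n + 1)]
    have h0 : ks.countP (fun v => decide (v < k0)) = 0 := by
      apply List.countP_eq_zero.mpr
      intro v hv
      simp only [decide_eq_true_eq]
      exact not_lt.mpr (le_of_lt (hhead v hv))
    have hmap : ks.map (fun k => (n + 1 + ((ks.countP (fun v => decide (v < k)) : Nat) : Int)) * cnt k)
        = ks.map (fun k => (n + ((((k0 :: ks).countP (fun v => decide (v < k)) : Nat)) : Int)) * cnt k) := by
      apply List.map_congr_left
      intro k hk
      have : (k0 :: ks).countP (fun v => decide (v < k)) = ks.countP (fun v => decide (v < k)) + 1 := by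
        simp [hhead k hk]
      rw [this]; push_cast; ring
    have hh0 : (k0 :: ks).countP (fun v => decide (v < k0)) = 0 := by
      simp [h0]
    simp only [List.map_cons, List.sum_cons]
    rw [← hmap, hh0]
    push_cast
    ring

-- on a strictly increasing list, #{v ≤ k} = #{v < k} + 1 for k in the list
theorem pvCountLtLe (ks : List Int) (hks : ks.Pairwise (· < ·)) (k : Int) (hk : k ∈ ks) :
    (ks.countP (fun v => decide (v ≤ k))) = ks.countP (fun v => decide (v < k)) + 1 := by
  have hnd : ks.Nodup := List.Pairwise.imp (fun h => ne_of_lt h) hks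
  have hsplit : ∀ l : List Int, l.countP (fun v => decide (v ≤ k))
      = l.countP (fun v => decide (v < k)) + l.count k := by
    intro l
    induction l with
    | nil => simp
    | cons a t ih =>
      simp only [List.countP_cons, List.count_cons, ih]
      rcases lt_trichotomy a k with h | h | h
      · simp [h, le_of_lt h, ne_of_lt h]; omega
      · subst h; simp; omega
      · simp [not_le.mpr h, lt_asymm h, (ne_of_gt h : a ≠ k)]
  rw [hsplit, List.count_eq_one_of_mem hnd hk]

-- sum over a list = count-weighted sum over any nodup list carrying its values
theorem pvSumDedup (f : Int → Int) :
    ∀ (ds s : List Int), ds.Nodup → (∀ x, x ∈ s → x ∈ ds) →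
      (s.map f).sum = (ds.map (fun k => (s.count k : Int) * f k)).sum := by
  intro ds
  induction ds with
  | nil =>
    intro s _ h
    have : s = [] := List.eq_nil_iff_forall_not_mem.mpr (fun x hx => by simpa using h x hx)
    simp [this]
  | cons k ds ih =>
    intro s hnd h
    have hknd : k ∉ ds := (List.nodup_cons.mp hnd).1
    have hdsnd : ds.Nodup := (List.nodup_cons.mp hnd).2
    have hsum : ∀ t : List Int, (t.map f).sum
        = ((t.filter (fun v => v == k)).map f).sum + ((t.filter (fun v => !(v == k))).map f).sum := by
      intro t
      induction t with
      | nil => simp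
      | cons a t iht =>
        by_cases ha : a = k
        · simp [ha, iht]; ring
        · simp [ha, iht]; ring
    rw [hsum s]
    have h1 : ((s.filter (fun v => v == k)).map f).sum = (s.count k : Int) * f k := by
      rw [List.filter_beq k, List.map_replicate, List.sum_replicate]
      push_cast [nsmul_eq_mul]
      ring
    have h2 : ((s.filter (fun v => !(v == k))).map f).sum
        = (ds.map (fun k' => ((s.filter (fun v => !(v == k))).count k' : Int) * f k')).sum := by
      apply ih _ hdsnd
      intro x hx
      have hxs := List.mem_filter.mp hx
      have hne : x ≠ k := by simpa using hxs.2
      have := h x hxs.1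
      simp only [List.mem_cons] at this
      tauto
    have h3 : (ds.map (fun k' => ((s.filter (fun v => !(v == k))).count k' : Int) * f k')).sum
        = (ds.map (fun k' => (s.count k' : Int) * f k')).sum := by
      congr 1
      apply List.map_congr_left
      intro k' hk'
      have : (s.filter (fun v => !(v == k))).count k' = s.count k' := by
        apply List.count_filter
        simp only [Bool.not_eq_eq_eq_not, Bool.not_true, beq_eq_false_iff_ne, ne_eq]
        intro hh; exact hknd (hh ▸ hk')
      rw [this]
    rw [h1, h2, h3]
    simp

-- on a sorted list the last element is maximal
theorem pvLastMax (t : List Int) (ht : t.Pairwise (· ≤ ·)) (p : Int)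
    (hp : t.getLast? = some p) : ∀ y ∈ t, y ≤ p := by
  rcases List.getLast?_eq_some_iff.mp hp with ⟨ys, rfl⟩
  have hpa := List.pairwise_append.mp ht
  intro y hy
  rcases List.mem_append.mp hy with h | h
  · exact hpa.2.2 y h p (List.mem_singleton.mpr rfl)
  · rw [List.mem_singleton.mp h]

-- B's scan, closed form on a sorted list: total, rank, previous value
theorem pvScanB (t : List Int) (ht : t.Pairwise (· ≤ ·)) :
    t.foldl
      (fun (st : Int × Int × Option Int) x =>
        let rank := match st.2.2 with
          | none => st.2.1 + 1
          | some p => if x ≠ p then st.2.1 + 1 else st.2.1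
        (st.1 + rank, rank, some x))
      (0, 0, none)
    = ((t.map (fun x => (((PySem.Set.ofList t).countP (fun v => decide (v ≤ x)) : Nat) : Int))).sum,
        ((PySem.Set.ofList t).length : Int), t.getLast?) := by
  induction t using List.reverseRecOn with
  | nil => simp [PySem.Set.ofList]
  | append_singleton t' x ih =>
    have hpa := List.pairwise_append.mp ht
    have ht' : t'.Pairwise (· ≤ ·) := hpa.1
    have hall : ∀ y ∈ t', y ≤ x := fun y hy => hpa.2.2 y hy x (List.mem_singleton.mpr rfl)
    rw [List.foldl_append, ih ht']
    have hofl : PySem.Set.ofList (t' ++ [x])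
        = PySem.Set.add (PySem.Set.ofList t') x := by
      rw [PySem.Set.ofList_append, PySem.Set.update_cons, PySem.Set.update_nil]
    have hlastx : (t' ++ [x]).getLast? = some x := List.getLast?_concat
    by_cases hx : x ∈ t'
    · -- x repeats the previous value: rank stays, the value set is unchanged
      have hne : t' ≠ [] := List.ne_nil_of_mem hx
      obtain ⟨p, hp⟩ := List.getLast?_isSome.mpr hne |> Option.isSome_iff_exists.mp
      have hpx : p = x := le_antisymm (hall p (List.mem_of_getLast? hp)) (pvLastMax t' ht' p hp x hx)
      have hplast : t'.getLast? = some x := by rw [hp, hpx]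
      have hset : PySem.Set.ofList (t' ++ [x]) = PySem.Set.ofList t' := by
        rw [hofl]
        simp [PySem.Set.add, PySem.Set.contains, (PySem.Set.mem_ofList t' x).mpr hx]
      have hcx : (PySem.Set.ofList t').countP (fun v => decide (v ≤ x)) = (PySem.Set.ofList t').length := by
        apply List.countP_eq_length.mpr
        intro v hv
        exact decide_eq_true (hall v ((PySem.Set.mem_ofList t' v).mp hv))
      simp only [hplast, hset, hlastx, List.map_append, List.sum_append, List.map_singleton,
        List.sum_singleton, hcx]
      simp
    · -- x is a new value: rank increments, the value set gains x at the end
      have hset : PySem.Set.ofList (t' ++ [x]) = PySem.Set.ofList t' ++ [x] := by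
        rw [hofl]
        simp [PySem.Set.add, PySem.Set.contains]
        intro hmem
        exact absurd hmem hx
      have hgy : ∀ y ∈ t',
          (((PySem.Set.ofList (t' ++ [x])).countP (fun v => decide (v ≤ y)) : Nat) : Int)
            = (((PySem.Set.ofList t').countP (fun v => decide (v ≤ y)) : Nat) : Int) := by
        intro y hy
        rw [hset, List.countP_append]
        have : ¬ (x ≤ y) := fun hle => hx (le_antisymm hle (hall y hy) ▸ hy)
        simp [this]
      have hgx : (PySem.Set.ofList (t' ++ [x])).countP (fun v => decide (v ≤ x))
          = (PySem.Set.ofList t').length + 1 := by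
        rw [hset]
        have : (PySem.Set.ofList t' ++ [x]).countP (fun v => decide (v ≤ x))
            = (PySem.Set.ofList t' ++ [x]).length := by
          apply List.countP_eq_length.mpr
          intro v hv
          rcases List.mem_append.mp hv with h | h
          · exact decide_eq_true (hall v ((PySem.Set.mem_ofList t' v).mp h))
          · exact decide_eq_true (le_of_eq (List.mem_singleton.mp h))
        rw [this]
        simp
      have hlen : ((PySem.Set.ofList (t' ++ [x])).length : Int)
          = ((PySem.Set.ofList t').length : Int) + 1 := by
        rw [hset]
        simp
      rcases hgl : t'.getLast? with _ | p
      · have ht0 : t' = [] := List.getLast?_eq_none_iff.mp hgl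
        subst ht0
        simp only [List.nil_append] at hset hgx hlen hlastx ⊢
        simp [PySem.Set.ofList]
      · have hpx : x ≠ p := fun h => hx (h ▸ List.mem_of_getLast? hgl)
        simp only [hlastx, List.map_append, List.sum_append, List.map_singleton,
          List.sum_singleton, hgx, hlen, List.map_congr_left hgy]
        simp [hpx]

-- the two ports agree
theorem pvMain (children : List Int) : giveCandies children = giveCandies_alt children := by
  rw [pvStep1]
  unfold giveCandies_alt
  dsimp only
  have hsort : (PySem.List.sorted children (fun x => x)).Pairwise (· ≤ ·) :=
    PySem.List.sorted_pairwise children (fun x => x)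
  generalize hg : PySem.List.sorted children (fun x => x) = s
  rw [hg] at hsort
  rw [pvScanB s hsort]
  rw [PySem.Dict.keys_counter]
  simp only [PySem.Dict.getD_counter]
  set ks := PySem.List.sorted (PySem.Set.ofList s) (fun x => x) with hksdef
  have hlt : ks.Pairwise (· < ·) := PySem.List.sorted_ofList_pairwise_lt s
  have hnd : ks.Nodup := List.Pairwise.imp (fun h => ne_of_lt h) hlt
  have hperm : ks.Perm (PySem.Set.ofList s) := PySem.List.sorted_perm _ _ _
  have hmem : ∀ x, x ∈ s → x ∈ ks := by
    intro x hx
    rw [PySem.List.mem_sorted, PySem.Set.mem_ofList]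
    exact hx
  rw [pvFoldA (fun k => ((s.count k : Nat) : Int)) ks hlt 0 1]
  have hcongr : ks.map (fun k => (1 + (ks.countP (fun v => decide (v < k)) : Int)) * ((s.count k : Nat) : Int))
      = ks.map (fun k => ((s.count k : Nat) : Int) * ((ks.countP (fun v => decide (v ≤ k)) : Nat) : Int)) := by
    apply List.map_congr_left
    intro k hk
    rw [pvCountLtLe ks hlt k hk]
    push_cast
    ring
  rw [hcongr, ← pvSumDedup (fun x => ((ks.countP (fun v => decide (v ≤ x)) : Nat) : Int)) ks s hnd hmem]
  have hsame : s.map (fun x => ((ks.countP (fun v => decide (v ≤ x)) : Nat) : Int))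
      = s.map (fun x => (((PySem.Set.ofList s).countP (fun v => decide (v ≤ x)) : Nat) : Int)) := by
    apply List.map_congr_left
    intro x _
    rw [hperm.countP_eq]
  rw [hsame]
  simp

-- ===== VERDICT (by name: the statement is the Claim_ definition above) =====
theorem giveCandies_spec : Claim_equal_giveCandies := by
  intro children _
  unfold Spec_giveCandies
  exact pvMain children
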